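-- pv_equiv track=rewrite | github.com/tpz84/TpisFire | Sign In Sytem.py | hashThis
-- ===== SOURCE A (Python) =====
-- prime = 110339
--
-- salt1 = "tnfccaujnk"
--
-- salt2 = "niejmqfhep"
--
-- def hashThis(userCred):
--     hashedTerm = ""
--     toHash = salt1 + userCred + salt2
--     stringLength = len(toHash)
--     cutSpot = 0
--     while stringLength > 0:
--         swapLetter = toHash[cutSpot]
--         numberV = ord(swapLetter)
--         hashedChar = numberV * prime
--         hashedTerm = int(str(hashedTerm) + str(hashedChar))
--         stringLength -= 1
--         cutSpot -= 1
--     return hashedTerm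
-- ===== SOURCE B (Python) =====
-- prime = 110339
--
-- salt1 = "tnfccaujnk"
--
-- salt2 = "niejmqfhep"
--
-- def hashThis(userCred):
--     # Build the result from the least-significant end: walk the tail left-to-right
--     # (then the first character), placing each block at its final decimal position.
--     toHash = salt1 + userCred + salt2
--     acc = 0
--     shift = 0
--     for c in toHash[1:] + toHash[0]:
--         v = ord(c) * prime
--         acc += v * 10 ** shift
--         shift += len(str(v))
--     return acc
-- ===== Notes on version B (the rewrite author's own statement) =====
-- stated objective: faster
-- what changed: B reverses the construction direction: instead of A's loop that visits the first char then the tail in reverse and re-parses str(acc)+str(block) each step, B walks the string forward once (tail then first char), keeps a (acc, shift) pair and places each block v = ord(c)*prime directly at its final decimal position via acc += v * 10**shift; shift += len(str(v)), so the result is built back-to-front with no int<->str round trips on the accumulator.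
import Mathlib
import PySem

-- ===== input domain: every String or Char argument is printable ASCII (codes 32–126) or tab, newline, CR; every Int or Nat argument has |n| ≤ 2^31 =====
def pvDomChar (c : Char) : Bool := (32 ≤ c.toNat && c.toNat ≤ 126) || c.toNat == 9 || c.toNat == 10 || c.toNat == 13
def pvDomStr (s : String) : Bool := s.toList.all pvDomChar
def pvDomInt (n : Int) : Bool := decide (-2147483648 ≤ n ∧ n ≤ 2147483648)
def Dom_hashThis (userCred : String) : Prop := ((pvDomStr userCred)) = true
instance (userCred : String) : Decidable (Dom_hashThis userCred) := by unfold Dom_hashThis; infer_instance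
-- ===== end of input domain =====

-- B builds the number from the least-significant end in one forward pass with a (acc, shift) pair,
-- instead of A's visit-first-char-then-reversed-tail loop that reparses str(acc)+str(block) each
-- step; equivalence of the RETURN value is proved on Pre_hashThis (the inputs where Python A
-- returns instead of raising ValueError at CPython's default 4300-digit int↔str conversion limit).

-- ===== PORT A =====
def pvPrime : Int := 110339
def pvSalt1 : String := "tnfccaujnk"
def pvSalt2 : String := "niejmqfhep"

def pvDigitsParse (cs : List Char) : Nat :=
  cs.foldl (fun a c => a * 10 + (c.toNat - '0'.toNat)) 0

-- hand-port of Python int(s): exact for the arguments A feeds it (nonempty strings of ASCII decimal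
-- digits, namely str(acc)+str(v) for nonnegative ints acc, v) under CPython's default 4300-digit
-- conversion limit; none = ValueError.  (PySem.Int.ofStr? agrees on these inputs but its internal
-- parser is a private definition, which blocks every proof about it.)
def pvIntOfDigits? (cs : List Char) : Option Int :=
  if cs.length ≤ 4300 ∧ cs ≠ [] ∧ cs.all Char.isDigit then
    some ((pvDigitsParse cs : Nat) : Int)
  else none

-- str(hashedTerm): the variable holds the string "" before the first iteration, afterwards an int
def pvStrOfTerm : Option Int → List Char
  | none => []
  | some n => PySem.Int.toChars n

-- the while-loop of A; fuel = stringLength (decremented once per iteration, exactly as in A);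
-- outer none = ValueError propagating out of int(...)
def hashThisLoop (toHash : List Char) (stringLength : Nat) (cutSpot : Int)
    (hashedTerm : Option Int) : Option (Option Int) :=
  match stringLength with
  | 0 => some hashedTerm
  | l + 1 =>
    let swapLetter := PySem.List.pyGetD toHash cutSpot ' '   -- toHash[cutSpot]; always in range here
    let numberV : Int := (swapLetter.toNat : Int)            -- ord(swapLetter)
    let hashedChar := numberV * pvPrime
    match pvIntOfDigits? (pvStrOfTerm hashedTerm ++ PySem.Int.toChars hashedChar) with
    | none => none                                           -- ValueError
    | some t => hashThisLoop toHash l (cutSpot - 1) (some t)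

def hashThis (userCred : String) : Int :=
  let toHash := pvSalt1.toList ++ userCred.toList ++ pvSalt2.toList
  -- return hashedTerm; both getD defaults are unreachable under Pre_: the loop runs ≥ 20
  -- iterations (so the "" state is gone) and no int(...) raises
  ((hashThisLoop toHash toHash.length 0 none).getD (some 0)).getD 0

-- ===== PORT B =====
-- the loop body of Source B: acc += v * 10 ** shift; shift += len(str(v)), with v = ord(c) * prime
def pvLowStep (st : Int × Nat) (c : Char) : Int × Nat :=
  let v : Int := (c.toNat : Int) * pvPrime
  (st.1 + v * 10 ^ st.2, st.2 + (PySem.Int.toChars v).length)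

def hashThis_alt (userCred : String) : Int :=
  let toHash := pvSalt1.toList ++ userCred.toList ++ pvSalt2.toList
  -- for c in toHash[1:] + toHash[0]
  let order := PySem.List.slice toHash (some 1) none ++ [PySem.List.pyGetD toHash 0 ' ']
  (order.foldl pvLowStep (0, 0)).1

-- ===== PRECONDITION & SPEC =====
-- Pre_ excludes exactly the inputs on which Python A raises ValueError: with CPython's default
-- 4300-digit int↔str conversion limit, A's int(str(acc)+str(v)) raises as soon as the concatenated
-- decimal string exceeds 4300 digits, i.e. iff the total digit count of all per-character blocks
-- exceeds 4300.
def Pre_hashThis (userCred : String) : Prop :=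
  ((("tnfccaujnk".toList ++ userCred.toList ++ "niejmqfhep".toList).map
      (fun c => (PySem.Int.toChars ((c.toNat : Int) * 110339)).length)).sum) ≤ 4300
instance (userCred : String) : Decidable (Pre_hashThis userCred) := by unfold Pre_hashThis; infer_instance
def pvWitness_hashThis : String := "user@example.com"

def Spec_hashThis (userCred : String) (out : Int) : Prop := out = hashThis_alt userCred
instance (userCred : String) (out : Int) : Decidable (Spec_hashThis userCred out) := by unfold Spec_hashThis; infer_instance

-- ===== CLAIM (what is proved, stated in full; the proofs are below) =====
def Claim_equal_hashThis : Prop := ∀ (userCred : String), Dom_hashThis userCred → Pre_hashThis userCred → Spec_hashThis userCred (hashThis userCred)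

-- ===== LEMMAS AND PROOFS =====

-- proof-only notion: the most-significant-first concatenation step (A's effective update)
def pvAccStep (acc : Int) (c : Char) : Int :=
  acc * 10 ^ (PySem.Int.toChars ((c.toNat : Int) * pvPrime)).length + (c.toNat : Int) * pvPrime

-- canonical decimal digit list of a Nat (what Nat.toDigits 10 computes, in recursive form)
def repC (m : Nat) : List Char :=
  if m < 10 then [Nat.digitChar m] else repC (m / 10) ++ [Nat.digitChar (m % 10)]
  decreasing_by exact Nat.div_lt_self (by omega) (by omega)

theorem repC_of_lt {m : Nat} (h : m < 10) : repC m = [Nat.digitChar m] := by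
  rw [repC]; simp [h]

theorem repC_of_ge {m : Nat} (h : ¬ m < 10) : repC m = repC (m / 10) ++ [Nat.digitChar (m % 10)] := by
  rw [repC]; simp [h]

theorem toDigitsCore_eq_repC : ∀ (f n : Nat) (l : List Char), n < f →
    Nat.toDigitsCore 10 f n l = repC n ++ l := by
  intro f
  induction f with
  | zero => intro n l h; omega
  | succ f ih =>
    intro n l h
    show (let d := Nat.digitChar (n % 10); let n' := n / 10;
          if n' = 0 then d :: l else Nat.toDigitsCore 10 f n' (d :: l)) = repC n ++ l
    by_cases h10 : n / 10 = 0
    · have hn : n < 10 := by omega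
      simp [h10, Nat.mod_eq_of_lt hn, repC_of_lt hn]
    · have hge : ¬ n < 10 := by
        intro hlt; exact h10 (Nat.div_eq_of_lt hlt)
      have hrec : n / 10 < f := by
        have h1 : n / 10 < n := Nat.div_lt_self (by omega) (by omega)
        omega
      simp only [h10, ih (n / 10) (Nat.digitChar (n % 10) :: l) hrec,
        repC_of_ge hge, List.append_assoc, List.cons_append, List.nil_append]
      simp

theorem toDigits_eq_repC (n : Nat) : Nat.toDigits 10 n = repC n := by
  have := toDigitsCore_eq_repC (n + 1) n [] (by omega)
  simpa [Nat.toDigits] using this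

theorem repC_ne_nil (n : Nat) : repC n ≠ [] := by
  by_cases h : n < 10
  · simp [repC_of_lt h]
  · simp [repC_of_ge h]

theorem digitChar_isDigit : ∀ k : Nat, k < 10 → (Nat.digitChar k).isDigit = true := by decide

theorem digitChar_val : ∀ k : Nat, k < 10 → (Nat.digitChar k).toNat - '0'.toNat = k := by decide

theorem repC_all_digit (n : Nat) : ∀ c ∈ repC n, c.isDigit = true := by
  induction n using Nat.strong_induction_on with
  | _ n ih =>
    by_cases h : n < 10
    · simp only [repC_of_lt h, List.mem_singleton]
      rintro c rfl; exact digitChar_isDigit n h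
    · simp only [repC_of_ge h, List.mem_append, List.mem_singleton]
      rintro c (hc | rfl)
      · exact ih (n / 10) (Nat.div_lt_self (by omega) (by omega)) c hc
      · exact digitChar_isDigit (n % 10) (Nat.mod_lt n (by omega))

theorem parse_shift (ys : List Char) : ∀ a : Nat,
    List.foldl (fun a c => a * 10 + (c.toNat - '0'.toNat)) a ys
      = a * 10 ^ ys.length + pvDigitsParse ys := by
  induction ys with
  | nil => intro a; simp [pvDigitsParse]
  | cons c ys ih =>
    intro a
    have h1 := ih (a * 10 + (c.toNat - '0'.toNat))
    have h2 := ih (0 * 10 + (c.toNat - '0'.toNat))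
    simp only [List.foldl_cons, pvDigitsParse] at *
    rw [h1, h2]
    simp only [List.length_cons, pow_succ]
    ring

theorem parse_append (xs ys : List Char) :
    pvDigitsParse (xs ++ ys) = pvDigitsParse xs * 10 ^ ys.length + pvDigitsParse ys := by
  unfold pvDigitsParse
  rw [List.foldl_append, parse_shift]
  rfl

theorem parse_repC (n : Nat) : pvDigitsParse (repC n) = n := by
  induction n using Nat.strong_induction_on with
  | _ n ih =>
    by_cases h : n < 10
    · simp only [repC_of_lt h, pvDigitsParse, List.foldl_cons, List.foldl_nil]
      rw [digitChar_val n h]; omega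
    · rw [repC_of_ge h, parse_append, ih (n / 10) (Nat.div_lt_self (by omega) (by omega))]
      have : pvDigitsParse [Nat.digitChar (n % 10)] = n % 10 := by
        simp only [pvDigitsParse, List.foldl_cons, List.foldl_nil]
        rw [digitChar_val (n % 10) (Nat.mod_lt n (by omega))]; omega
      rw [this]
      simp only [List.length_singleton, pow_one]
      omega

theorem lt_pow_length (n : Nat) : n < 10 ^ (repC n).length := by
  induction n using Nat.strong_induction_on with
  | _ n ih =>
    by_cases h : n < 10
    · simpa [repC_of_lt h] using h
    · have h1 := ih (n / 10) (Nat.div_lt_self (by omega) (by omega))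
      rw [repC_of_ge h]
      simp only [List.length_append, List.length_singleton, pow_succ]
      have h2 : n = 10 * (n / 10) + n % 10 := (Nat.div_add_mod n 10).symm
      have h3 : n % 10 < 10 := Nat.mod_lt n (by omega)
      nlinarith

theorem pow_length_le (n : Nat) (hn : 1 ≤ n) : 10 ^ ((repC n).length - 1) ≤ n := by
  induction n using Nat.strong_induction_on with
  | _ n ih =>
    by_cases h : n < 10
    · simp [repC_of_lt h]; omega
    · have hpos : 0 < (repC (n / 10)).length := List.length_pos_iff.mpr (repC_ne_nil _)
      have h1 := ih (n / 10) (Nat.div_lt_self (by omega) (by omega)) (by omega)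
      rw [repC_of_ge h]
      simp only [List.length_append, List.length_singleton]
      have heq : (repC (n / 10)).length + 1 - 1 = ((repC (n / 10)).length - 1) + 1 := by omega
      rw [heq, pow_succ]
      have h2 : n = 10 * (n / 10) + n % 10 := (Nat.div_add_mod n 10).symm
      omega

theorem repC_length_eq {m l : Nat} (hl : 1 ≤ l) (h1 : 10 ^ (l - 1) ≤ m) (h2 : m < 10 ^ l) :
    (repC m).length = l := by
  have hm : 1 ≤ m := le_trans (Nat.one_le_pow _ _ (by omega)) h1
  have hu := lt_pow_length m
  have hlo := pow_length_le m hm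
  by_contra hne
  rcases Nat.lt_or_ge (repC m).length l with hlt | hge
  · have : 10 ^ (repC m).length ≤ 10 ^ (l - 1) := Nat.pow_le_pow_right (by omega) (by omega)
    omega
  · have hgt : l < (repC m).length := by omega
    have : 10 ^ l ≤ 10 ^ ((repC m).length - 1) := Nat.pow_le_pow_right (by omega) (by omega)
    omega

theorem repC_concat_length (a v k : Nat) (ha : 1 ≤ a) (hv : v < 10 ^ k) :
    (repC (a * 10 ^ k + v)).length = (repC a).length + k := by
  have hpos : 0 < (repC a).length := List.length_pos_iff.mpr (repC_ne_nil a)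
  apply repC_length_eq (by omega)
  · have h1 : 10 ^ ((repC a).length - 1) ≤ a := pow_length_le a ha
    have heq : (repC a).length + k - 1 = ((repC a).length - 1) + k := by omega
    rw [heq, pow_add]
    exact le_trans (Nat.mul_le_mul_right _ h1) (by omega)
  · have h2 : a < 10 ^ (repC a).length := lt_pow_length a
    rw [pow_add]
    have : (a + 1) * 10 ^ k ≤ 10 ^ (repC a).length * 10 ^ k :=
      Nat.mul_le_mul_right _ (by omega)
    nlinarith

theorem toChars_eq_repC (n : Int) (h : 0 ≤ n) : PySem.Int.toChars n = repC n.toNat := by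
  have hneg : ¬ n < 0 := by omega
  simp only [PySem.Int.toChars, if_neg hneg, toDigits_eq_repC]

-- the per-iteration agreement: int(str(a)+str(v)) = a * 10 ** len(str(v)) + v
theorem intOfDigits_append (a v : Int) (ha : 0 ≤ a) (hv : 0 ≤ v)
    (hlen : (PySem.Int.toChars a).length + (PySem.Int.toChars v).length ≤ 4300) :
    pvIntOfDigits? (PySem.Int.toChars a ++ PySem.Int.toChars v)
      = some (a * 10 ^ (PySem.Int.toChars v).length + v) := by
  rw [toChars_eq_repC a ha, toChars_eq_repC v hv] at *
  have hne : repC a.toNat ++ repC v.toNat ≠ [] := by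
    simp [repC_ne_nil]
  have hall : (repC a.toNat ++ repC v.toNat).all Char.isDigit = true := by
    rw [List.all_eq_true]
    intro c hc
    rcases List.mem_append.mp hc with h | h
    · exact repC_all_digit _ c h
    · exact repC_all_digit _ c h
  rw [pvIntOfDigits?, if_pos ⟨by simpa using hlen, hne, hall⟩]
  rw [parse_append, parse_repC, parse_repC]
  congr 1
  push_cast
  rw [Int.toNat_of_nonneg ha, Int.toNat_of_nonneg hv]

theorem intOfDigits_single (v : Int) (hv : 0 ≤ v)
    (hlen : (PySem.Int.toChars v).length ≤ 4300) :
    pvIntOfDigits? (PySem.Int.toChars v) = some v := by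
  rw [toChars_eq_repC v hv] at *
  rw [pvIntOfDigits?, if_pos ⟨by simpa using hlen, repC_ne_nil _, by
    rw [List.all_eq_true]; exact fun c hc => repC_all_digit _ c hc⟩]
  rw [parse_repC, Int.toNat_of_nonneg hv]

-- one iteration of A as an Option-monad step
def pvStepA? (st : Option Int) (c : Char) : Option (Option Int) :=
  (pvIntOfDigits? (pvStrOfTerm st ++ PySem.Int.toChars ((c.toNat : Int) * pvPrime))).map some

theorem loop_eq_foldlM (l : List Char) : ∀ (m : Nat) (st : Option Int), m < l.length →
    hashThisLoop l m ((m : Int) - l.length) st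
      = List.foldlM pvStepA? st ((l.tail.take m).reverse) := by
  intro m
  induction m with
  | zero => intro st _; simp [hashThisLoop]
  | succ m ih =>
    intro st hm
    have hk : (((m : Nat) + 1 : Nat) : Int) - l.length = -((l.length - (m + 1) : Nat) : Int) := by
      push_cast; omega
    have htl : m < l.tail.length := by
      simp [List.length_tail]; omega
    show hashThisLoop l (m + 1) (((m : Nat) + 1 : Nat) - (l.length : Int)) st = _
    rw [hashThisLoop, hk,
      PySem.List.pyGetD_neg_natCast l (l.length - (m + 1)) ' ' (by omega) (by omega)]
    have hidx : l.length - (l.length - (m + 1)) = m + 1 := by omega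
    have hget : l[l.length - (l.length - (m + 1))]'(by omega) = l.tail[m]'htl := by
      rw [List.getElem_tail]
      exact getElem_congr rfl hidx _
    have htake : (l.tail.take (m + 1)).reverse = l.tail[m]'htl :: (l.tail.take m).reverse := by
      rw [List.take_add_one, List.getElem?_eq_getElem htl]
      simp
    rw [htake, List.foldlM_cons]
    have hcut : -((l.length - (m + 1) : Nat) : Int) - 1 = (m : Int) - l.length := by
      omega
    rw [hget]
    cases hstep : pvIntOfDigits? (pvStrOfTerm st ++ PySem.Int.toChars (((l.tail[m]'htl).toNat : Int) * pvPrime)) with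
    | none =>
      simp only [pvStepA?, hstep, Option.map_none]
      rfl
    | some t =>
      simp only [pvStepA?, hstep, Option.map_some]
      rw [hcut, ih (some t) (by omega)]
      rfl

-- the success chain: as long as every int(...) stays within the 4300-digit limit,
-- A's iterated reparse computes exactly the most-significant-first concatenation fold
theorem foldAB : ∀ (L : List Char) (a : Int), 0 < a →
    (repC a.toNat).length + (L.map (fun c => (repC (c.toNat * 110339)).length)).sum ≤ 4300 →
    List.foldlM pvStepA? (some a) L = some (some (List.foldl pvAccStep a L)) := by
  intro L
  induction L with
  | nil => intro a _ _; rfl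
  | cons c L ih =>
    intro a ha hlen
    simp only [List.map_cons, List.sum_cons] at hlen
    have hvcast : ((c.toNat : Int) * pvPrime) = ((c.toNat * 110339 : Nat) : Int) := by
      unfold pvPrime; push_cast; ring
    have hv : (0 : Int) ≤ (c.toNat : Int) * pvPrime := by rw [hvcast]; positivity
    have hvlen : (PySem.Int.toChars ((c.toNat : Int) * pvPrime)).length
        = (repC (c.toNat * 110339)).length := by
      rw [toChars_eq_repC _ hv, hvcast, Int.toNat_natCast]
    have halen : (PySem.Int.toChars a).length = (repC a.toNat).length := by
      rw [toChars_eq_repC _ (le_of_lt ha)]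
    have hstep : pvStepA? (some a) c = some (some (pvAccStep a c)) := by
      unfold pvStepA? pvStrOfTerm pvAccStep
      rw [intOfDigits_append a _ (le_of_lt ha) hv (by rw [halen, hvlen]; omega)]
      rfl
    have hpcast : ((10 : Int) ^ (repC (c.toNat * 110339)).length)
        = ((10 ^ (repC (c.toNat * 110339)).length : Nat) : Int) := by norm_cast
    have haccN : (pvAccStep a c).toNat
        = a.toNat * 10 ^ (repC (c.toNat * 110339)).length + c.toNat * 110339 := by
      unfold pvAccStep
      rw [hvlen, hvcast, hpcast]
      conv_lhs => rw [← Int.toNat_of_nonneg (le_of_lt ha)]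
      rw [← Nat.cast_mul, ← Nat.cast_add, Int.toNat_natCast]
    have ha' : (0 : Int) < pvAccStep a c := by
      unfold pvAccStep
      have h1 : (0 : Int) < a * 10 ^ (PySem.Int.toChars ((c.toNat : Int) * pvPrime)).length := by
        positivity
      omega
    have hlen' : (repC (pvAccStep a c).toNat).length
        = (repC a.toNat).length + (repC (c.toNat * 110339)).length := by
      rw [haccN]
      exact repC_concat_length _ _ _ (by omega) (lt_pow_length _)
    rw [List.foldlM_cons, hstep]
    show List.foldlM pvStepA? (some (pvAccStep a c)) L = _
    rw [List.foldl_cons]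
    apply ih _ ha'
    rw [hlen']
    omega

theorem blockLen_eq (c : Char) : (PySem.Int.toChars ((c.toNat : Int) * 110339)).length
    = (repC (c.toNat * 110339)).length := by
  have hvcast : ((c.toNat : Int) * (110339 : Int)) = ((c.toNat * 110339 : Nat) : Int) := by
    push_cast; ring
  rw [hvcast, toChars_eq_repC _ (by positivity), Int.toNat_natCast]

-- ===== B-side lemmas: the forward least-significant-first fold equals the
-- most-significant-first fold over the reversed list =====

theorem low_generalize : ∀ (L : List Char) (a : Int) (s : Nat),
    List.foldl pvLowStep (a, s) L
      = (a + (List.foldl pvLowStep (0, 0) L).1 * 10 ^ s,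
         s + (List.foldl pvLowStep (0, 0) L).2) := by
  intro L
  induction L with
  | nil => intro a s; simp
  | cons c L ih =>
    intro a s
    simp only [List.foldl_cons]
    rw [show pvLowStep (a, s) c
        = (a + ((c.toNat : Int) * pvPrime) * 10 ^ s,
           s + (PySem.Int.toChars ((c.toNat : Int) * pvPrime)).length) from rfl,
      show pvLowStep ((0 : Int), (0 : Nat)) c
        = ((c.toNat : Int) * pvPrime * 10 ^ (0 : Nat),
           0 + (PySem.Int.toChars ((c.toNat : Int) * pvPrime)).length) from by
        simp [pvLowStep]]
    rw [ih, ih ((c.toNat : Int) * pvPrime * 10 ^ (0 : Nat))]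
    simp only [Prod.mk.injEq, pow_zero, mul_one, zero_add]
    refine ⟨?_, by omega⟩
    rw [pow_add]
    ring

theorem low_eq_high : ∀ (L : List Char),
    (List.foldl pvLowStep (0, 0) L).1 = List.foldl pvAccStep 0 L.reverse := by
  intro L
  induction L with
  | nil => simp
  | cons c L ih =>
    simp only [List.foldl_cons, List.reverse_cons, List.foldl_append, List.foldl_cons,
      List.foldl_nil]
    rw [show pvLowStep ((0 : Int), (0 : Nat)) c
        = ((c.toNat : Int) * pvPrime * 10 ^ (0 : Nat),
           0 + (PySem.Int.toChars ((c.toNat : Int) * pvPrime)).length) from by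
        simp [pvLowStep]]
    rw [low_generalize]
    simp only [pow_zero, mul_one, zero_add]
    rw [ih]
    unfold pvAccStep
    ring

-- ===== VERDICT (by name: the statement is the Claim_ definition above) =====
theorem hashThis_spec : Claim_equal_hashThis := by
  unfold Claim_equal_hashThis
  intro u _hDom hPre
  unfold Spec_hashThis
  unfold Pre_hashThis at hPre
  set T : List Char := ("nfccaujnk".toList ++ u.toList) ++ pvSalt2.toList with hT
  set L : List Char := pvSalt1.toList ++ u.toList ++ pvSalt2.toList with hLdef
  have hL : L = 't' :: T := by simp [hLdef, hT, pvSalt1]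
  -- Pre_, expressed through repC
  have hsum : ((L.map (fun c => (repC (c.toNat * 110339)).length)).sum) ≤ 4300 := by
    have hmap : L.map (fun c => (PySem.Int.toChars ((c.toNat : Int) * 110339)).length)
        = L.map (fun c => (repC (c.toNat * 110339)).length) :=
      List.map_congr_left (fun c _ => blockLen_eq c)
    have hLlit : L = "tnfccaujnk".toList ++ u.toList ++ "niejmqfhep".toList := by
      simp [hLdef, pvSalt1, pvSalt2]
    rw [hLlit] at hmap ⊢
    rw [← hmap]
    exact hPre
  rw [hL] at hsum
  simp only [List.map_cons, List.sum_cons] at hsum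
  -- the first hashed block
  set v0 : Int := (('t'.toNat : Int)) * pvPrime with hv0
  have hv0pos : (0 : Int) < v0 := by rw [hv0]; decide
  have hv0len : (PySem.Int.toChars v0).length = (repC ('t'.toNat * 110339)).length := by
    rw [hv0]; exact blockLen_eq 't'
  have hv0nat : v0.toNat = 't'.toNat * 110339 := by rw [hv0]; decide
  -- A's first iteration
  have hfirst : pvIntOfDigits? (pvStrOfTerm none ++ PySem.Int.toChars v0) = some v0 := by
    show pvIntOfDigits? ([] ++ PySem.Int.toChars v0) = some v0
    rw [List.nil_append]
    apply intOfDigits_single v0 (le_of_lt hv0pos)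
    rw [hv0len]
    omega
  -- A's loop, as a fold over 't' followed by the reversed tail
  have hA : hashThisLoop L L.length 0 none
      = some (some (List.foldl pvAccStep v0 T.reverse)) := by
    rw [hL]
    show hashThisLoop ('t' :: T) (T.length + 1) 0 none = _
    rw [hashThisLoop]
    simp only [PySem.List.pyGetD_zero_cons]
    rw [hfirst]
    show hashThisLoop ('t' :: T) T.length ((0 : Int) - 1) (some v0)
        = some (some (List.foldl pvAccStep v0 T.reverse))
    have hcut : ((0 : Int) - 1) = ((T.length : Nat) : Int) - (('t' :: T).length : Int) := by
      push_cast [List.length_cons]; ring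
    rw [hcut, loop_eq_foldlM ('t' :: T) T.length (some v0) (by simp)]
    simp only [List.tail_cons, List.take_length]
    apply foldAB T.reverse v0 hv0pos
    have hrev : (T.reverse.map (fun c => (repC (c.toNat * 110339)).length)).sum
        = (T.map (fun c => (repC (c.toNat * 110339)).length)).sum := by
      rw [List.map_reverse, List.sum_reverse]
    rw [hrev]
    have : (repC v0.toNat).length = (repC ('t'.toNat * 110339)).length := by rw [hv0nat]
    omega
  -- B's forward fold over (tail ++ [first char]) computes the same value
  have hB : hashThis_alt u = List.foldl pvAccStep v0 T.reverse := by
    unfold hashThis_alt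
    simp only []
    rw [PySem.List.slice_from_one]
    simp only [← hLdef, hL, List.tail_cons, PySem.List.pyGetD_zero_cons]
    rw [low_eq_high]
    simp only [List.reverse_append, List.reverse_cons, List.reverse_nil, List.nil_append,
      List.singleton_append, List.foldl_cons]
    have hstep0 : pvAccStep 0 't' = v0 := by
      unfold pvAccStep
      rw [hv0, zero_mul, zero_add]
    rw [hstep0]
  show ((hashThisLoop L L.length 0 none).getD (some 0)).getD 0 = hashThis_alt u
  rw [hA]
  simp only [Option.getD_some]
  exact hB.symm
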